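-- pv_equiv track=rewrite | github.com/JaeLinJoo/Python-Team-Notes | Study/programmers/84325.py | solution
-- ===== SOURCE A (Python) =====
-- def solution(table, languages, preference):
--     table_dict = {}
--     for t in table:
--         s_list = t.split(" ")
--         table_dict[s_list[0]] = s_list[1::]
--
--     max_point = [-1, '']
--     for job in table_dict:
--         point = 0
--         for i,lang in enumerate(languages):
--             if lang in table_dict[job]:
--                 point += preference[i] * (5-table_dict[job].index(lang))
--         if max_point[0] < point:
--             max_point[0] = point
--             max_point[1] = job
--         elif max_point[0] == point:
--             if max_point[1] > job:
--                 max_point[1] = job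
--
--     return max_point[1]
-- ===== SOURCE B (Python) =====
-- def solution(table, languages, preference):
--     # invert the scoring: precompute one weight dict from the preferences, then make a
--     # single pass over each job's own language row (first occurrences only), so the
--     # per-language membership test and .index scan over the row disappear
--     weight = {}
--     for lang, p in zip(languages, preference):
--         weight[lang] = weight.get(lang, 0) + p
--     scores = {}
--     for row in table:
--         name, *langs = row.split(" ")
--         s = 0
--         seen = set()
--         for k, l in enumerate(langs):
--             if l in weight and l not in seen:
--                 s += weight[l] * (5 - k)
--             seen.add(l)
--         scores[name] = s
--     # winner: best score, then lexicographically smallest name; ('', -1) is the default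
--     return min([('', -1)] + list(scores.items()), key=lambda ns: (-ns[1], ns[0]))[0]
-- ===== Notes on version B (the rewrite author's own statement) =====
-- stated objective: alternative
-- what changed: B inverts the scoring: it builds one weight dict from zip(languages, preference) up front and scores each job by a single pass over that job's own language row (first occurrences tracked with a seen set), so the per-language membership test and .index scan over the row disappear; the winner is then taken with one min() over (name, score) items under the key (-score, name).
-- outside the precondition, e.g. on solution(['a x', 'a b'], ['x'], []): A returns 'a', B returns 'a'
import Mathlib
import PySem

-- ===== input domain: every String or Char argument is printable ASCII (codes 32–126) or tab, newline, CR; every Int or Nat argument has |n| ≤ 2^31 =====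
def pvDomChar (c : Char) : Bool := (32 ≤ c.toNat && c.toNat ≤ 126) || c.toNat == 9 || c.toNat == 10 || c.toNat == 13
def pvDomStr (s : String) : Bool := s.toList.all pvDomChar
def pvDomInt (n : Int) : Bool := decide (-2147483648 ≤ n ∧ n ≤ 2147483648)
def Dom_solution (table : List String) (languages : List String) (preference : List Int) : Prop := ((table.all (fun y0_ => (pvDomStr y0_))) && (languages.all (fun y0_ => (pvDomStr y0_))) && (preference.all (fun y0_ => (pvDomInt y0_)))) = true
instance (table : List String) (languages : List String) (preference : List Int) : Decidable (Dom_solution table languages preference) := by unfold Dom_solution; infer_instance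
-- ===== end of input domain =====

-- B inverts the scoring: one weight dict built from zip(languages, preference) up front, then a single pass
-- over each job's own language row (seen set for first occurrences), winner by one min() under (-score, name);
-- objective: alternative decomposition. Equal return value proved on Pre_.

-- ===== PORT A =====
-- the inner 'for i, lang in enumerate(languages)' loop of A, with running index i and accumulator point
def solutionScoreA (preference : List Int) (tdj : List String) : List String → Nat → Int → Int
  | [], _, point => point
  | lang :: rest, i, point =>
      solutionScoreA preference tdj rest (i + 1)
        (if lang ∈ tdj then
           point + (PySem.List.pyGet? preference (i : Int)).getD 0 *
             (5 - (((PySem.List.index? tdj lang).getD 0 : Nat) : Int))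
         else point)

def solution (table : List String) (languages : List String) (preference : List Int) : String :=
  let tableDict : PySem.Dict String (List String) :=
    table.foldl (fun d t =>
      -- t.split(" "): sep ≠ "" so split? is never none; s_list[0]: split never returns [], getD unreachable
      let sList := (PySem.Str.split? t " ").getD []
      d.insert ((PySem.List.pyGet? sList 0).getD "") (PySem.List.slice sList (some 1) none))
      PySem.Dict.empty
  let maxPoint := tableDict.keys.foldl (fun mp job =>
      let tdj := tableDict.getD job []   -- table_dict[job]: job comes from the keys, never a KeyError
      let point := solutionScoreA preference tdj languages 0 0
      if mp.1 < point then (point, job)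
      else if mp.1 = point then (if job < mp.2 then (point, job) else mp)
      else mp)
    ((-1 : Int), "")
  maxPoint.2

-- ===== PORT B =====
-- weight = {}; for lang, p in zip(languages, preference): weight[lang] = weight.get(lang, 0) + p
def solutionWeight (languages : List String) (preference : List Int) : PySem.Dict String Int :=
  (languages.zip preference).foldl (fun d lp => d.insert lp.1 (d.getD lp.1 0 + lp.2)) PySem.Dict.empty

-- the inner 'for k, l in enumerate(langs)' loop of B, with accumulator s and the seen set
def solutionScoreB (w : PySem.Dict String Int) : List String → Nat → Int → PySem.Set String → Int
  | [], _, s, _ => s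
  | l :: rest, k, s, seen =>
      solutionScoreB w rest (k + 1)
        (if w.contains l && !(PySem.Set.contains seen l) then s + w.getD l 0 * (5 - (k : Int)) else s)
        (PySem.Set.add seen l)

def solution_alt (table : List String) (languages : List String) (preference : List Int) : String :=
  let w := solutionWeight languages preference
  let scores : PySem.Dict String Int :=
    table.foldl (fun d row =>
      let p := (PySem.Str.split? row " ").getD []   -- sep ≠ "", never none; p is never []
      d.insert ((PySem.List.pyGet? p 0).getD "") (solutionScoreB w (p.drop 1) 0 0 PySem.Set.empty))
      PySem.Dict.empty
  -- min([('', -1)] + list(scores.items()), key=lambda ns: (-ns[1], ns[0]))[0]; list nonempty, getD unreachable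
  ((PySem.List.min2? (("", (-1 : Int)) :: scores.items) (fun p => -p.2) (fun p => p.1)).getD ("", -1)).1

-- ===== PRECONDITION & SPEC =====
-- Pre_ excludes inputs where a language listed beyond preference's length occurs in some table row's
-- language list: A raises IndexError there (slightly conservative when a duplicate job name overwrites
-- such a row, see the cite in claim.json).
def Pre_solution (table : List String) (languages : List String) (preference : List Int) : Prop :=
  ((languages.drop preference.length).all (fun l =>
      table.all (fun t => !((((PySem.Str.split? t " ").getD []).drop 1).contains l)))) = true
instance (table : List String) (languages : List String) (preference : List Int) : Decidable (Pre_solution table languages preference) := by unfold Pre_solution; infer_instance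

def pvWitness_solution : List String × List String × List Int :=
  (["java backend junior pizza 150", "python frontend senior chocolate 100"], ["python", "java"], [5, 2])

def Spec_solution (table : List String) (languages : List String) (preference : List Int) (out : String) : Prop := out = solution_alt table languages preference
instance (table : List String) (languages : List String) (preference : List Int) (out : String) : Decidable (Spec_solution table languages preference out) := by unfold Spec_solution; infer_instance

-- ===== CLAIM (what is proved, stated in full; the proofs are below) =====
def Claim_equal_solution : Prop := ∀ (table : List String) (languages : List String) (preference : List Int), Dom_solution table languages preference → Pre_solution table languages preference → Spec_solution table languages preference (solution table languages preference)

-- ===== LEMMAS AND PROOFS =====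

-- for x ∈ l, PySem.List.index? (= idxOf?) is the plain idxOf
lemma index?_getD_eq_idxOf (l : List String) (x : String) (h : x ∈ l) :
    ((PySem.List.index? l x).getD 0 : Nat) = l.idxOf x := by
  induction l with
  | nil => cases h
  | cons a t ih =>
    simp only [PySem.List.index?] at ih ⊢
    rw [List.idxOf?_cons]
    by_cases hax : a = x
    · subst hax; simp [List.idxOf_cons_self]
    · have hx : x ∈ t := (List.mem_cons.1 h).resolve_left (fun he => hax he.symm)
      rw [if_neg (by simpa using hax), List.idxOf_cons_ne t hax]
      cases hio : List.idxOf? x t with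
      | none => exact absurd hx (List.idxOf?_eq_none_iff.1 hio)
      | some j =>
        have := ih hx
        rw [hio] at this
        simp only [Option.getD_some] at this
        simp [this]

-- A's enumerate-scoring loop equals a zip-sum, provided no language at an index ≥ |preference| matches
lemma scoreA_eq_sum (langs : List String) (preference : List Int) :
    ∀ (ls : List String) (i : Nat) (point : Int),
    (∀ l ∈ ls.drop (preference.length - i), ¬ l ∈ langs) →
    solutionScoreA preference langs ls i point
      = point + ((ls.zip (preference.drop i)).filterMap (fun lp =>
          if lp.1 ∈ langs then
            some (lp.2 * (5 - (((PySem.List.index? langs lp.1).getD 0 : Nat) : Int)))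
          else none)).sum := by
  intro ls
  induction ls with
  | nil => intro i point _; simp [solutionScoreA]
  | cons l rest ih =>
    intro i point h
    by_cases hi : i < preference.length
    · have hdrop : preference.drop i = preference[i] :: preference.drop (i + 1) :=
        List.drop_eq_getElem_cons hi
      have hh : ∀ l' ∈ rest.drop (preference.length - (i + 1)), ¬ l' ∈ langs := by
        intro l' hl'
        apply h
        have he : preference.length - i = (preference.length - (i + 1)) + 1 := by omega
        rw [he, List.drop_succ_cons]
        exact hl'
      by_cases hmem : l ∈ langs
      · rw [solutionScoreA, ih (i + 1) _ hh]
        simp only [hdrop, List.zip_cons_cons, List.filterMap_cons, if_pos hmem,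
          PySem.List.pyGet?_natCast, List.getElem?_eq_getElem hi, Option.getD_some, List.sum_cons]
        ring
      · rw [solutionScoreA, ih (i + 1) _ hh]
        simp only [hdrop, List.zip_cons_cons, List.filterMap_cons, if_neg hmem]
    · have hz : preference.length - i = 0 := by omega
      have h0 : ∀ l' ∈ l :: rest, ¬ l' ∈ langs := by simpa [hz] using h
      have hh : ∀ l' ∈ rest.drop (preference.length - (i + 1)), ¬ l' ∈ langs := by
        intro l' hl'
        exact h0 l' (List.mem_cons_of_mem _ (List.mem_of_mem_drop hl'))
      rw [solutionScoreA, ih (i + 1) _ hh]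
      have hd1 : preference.drop i = [] := List.drop_eq_nil_of_le (by omega)
      have hd2 : preference.drop (i + 1) = [] := List.drop_eq_nil_of_le (by omega)
      simp [hd1, hd2, h0 l List.mem_cons_self]

-- every value stored by the parsing fold is the tail of the split of some table row
lemma dict_values_from_table (table : List String) :
    ∀ (d : PySem.Dict String (List String)) (p : String × List String),
    p ∈ (table.foldl (fun d t =>
        d.insert ((PySem.List.pyGet? ((PySem.Str.split? t " ").getD []) 0).getD "")
          (((PySem.Str.split? t " ").getD []).drop 1)) d).items →
    p ∈ d.items ∨ ∃ t ∈ table, p.2 = ((PySem.Str.split? t " ").getD []).drop 1 := by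
  induction table with
  | nil => intro d p hp; exact Or.inl hp
  | cons t ts ih =>
    intro d p hp
    rcases ih _ p hp with h | ⟨t', ht', he⟩
    · rcases (PySem.Dict.mem_items_insert _ _ _ _).1 h with he | ⟨hd, _⟩
      · exact Or.inr ⟨t, List.mem_cons_self, by rw [he]⟩
      · exact Or.inl hd
    · exact Or.inr ⟨t', List.mem_cons_of_mem _ ht', he⟩

-- two small facts about Python sets, used by the seen-set loop
lemma set_contains_add_self (s : PySem.Set String) (x : String) :
    PySem.Set.contains (PySem.Set.add s x) x = true := by
  by_cases h : PySem.Set.contains s x <;> simp_all [PySem.Set.add, PySem.Set.contains]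

lemma set_contains_add_ne (s : PySem.Set String) (l x : String) (h : l ≠ x) :
    PySem.Set.contains (PySem.Set.add s l) x = PySem.Set.contains s x := by
  have hxl : ¬ x = l := fun he => h he.symm
  by_cases hc : PySem.Set.contains s l <;> simp_all [PySem.Set.add, PySem.Set.contains]

-- B's score loop is linear in its accumulator
lemma scoreB_shift (w : PySem.Dict String Int) :
    ∀ (langs : List String) (k : Nat) (s c : Int) (seen : PySem.Set String),
    solutionScoreB w langs k (s + c) seen = solutionScoreB w langs k s seen + c := by
  intro langs
  induction langs with
  | nil => intro k s c seen; rfl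
  | cons l rest ih =>
    intro k s c seen
    simp only [solutionScoreB]
    split_ifs with hc
    · rw [show s + c + w.getD l 0 * (5 - (k : Int)) = (s + w.getD l 0 * (5 - (k : Int))) + c by ring, ih]
    · exact ih _ _ _ _

-- scoring with the empty weight dict is the identity on the accumulator
lemma scoreB_empty :
    ∀ (langs : List String) (k : Nat) (s : Int) (seen : PySem.Set String),
    solutionScoreB PySem.Dict.empty langs k s seen = s := by
  intro langs
  induction langs with
  | nil => intro k s seen; rfl
  | cons l rest ih =>
    intro k s seen
    simp only [solutionScoreB, PySem.Dict.contains_empty, Bool.false_and, Bool.false_eq_true,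
      if_false]
    exact ih _ _ _

-- effect of one weight-dict insertion on B's score loop
lemma scoreB_insert (w : PySem.Dict String Int) (x : String) (v : Int) :
    ∀ (langs : List String) (k : Nat) (s : Int) (seen : PySem.Set String),
    solutionScoreB (w.insert x v) langs k s seen
      = solutionScoreB w langs k s seen
        + (if x ∈ langs ∧ PySem.Set.contains seen x = false
           then (v - (if w.contains x then w.getD x 0 else 0)) * (5 - ((k : Int) + (langs.idxOf x : Int)))
           else 0) := by
  intro langs
  induction langs with
  | nil => intro k s seen; simp [solutionScoreB]
  | cons l rest ih =>
    intro k s seen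
    simp only [solutionScoreB]
    rw [ih]
    by_cases hlx : l = x
    · subst hlx
      rw [PySem.Dict.contains_insert_self, PySem.Dict.getD_insert_self]
      by_cases hsx : PySem.Set.contains seen l = true
      · simp only [hsx, Bool.not_true, Bool.and_false, Bool.false_eq_true, if_false]
        simp [set_contains_add_self, hsx]
      · have hsx' : PySem.Set.contains seen l = false := by simpa using hsx
        simp only [hsx', Bool.not_false, Bool.and_true]
        simp only [set_contains_add_self, List.mem_cons_self, List.idxOf_cons_self, true_and,
          and_false, Bool.true_eq_false, if_false, if_true, Nat.cast_zero, add_zero]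
        by_cases hw : w.contains l = true
        · rw [if_pos hw, if_pos hw, scoreB_shift, scoreB_shift]; push_cast; ring
        · rw [if_neg hw, if_neg hw, scoreB_shift]; ring
    · have hcl : (w.insert x v).contains l = w.contains l := by
        rw [PySem.Dict.contains_insert]
        simp [show ¬ l = x from hlx]
      have hgl : (w.insert x v).getD l 0 = w.getD l 0 :=
        PySem.Dict.getD_insert_of_ne w _ _ hlx
      rw [hcl, hgl, set_contains_add_ne seen l x hlx]
      congr 1
      have hiff : (x ∈ rest ∧ PySem.Set.contains seen x = false)
          ↔ (x ∈ l :: rest ∧ PySem.Set.contains seen x = false) := by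
        apply and_congr_left'
        rw [List.mem_cons]
        exact (or_iff_right (fun he => hlx he.symm)).symm
      rw [if_congr hiff rfl rfl]
      by_cases hcond : x ∈ l :: rest ∧ PySem.Set.contains seen x = false
      · rw [if_pos hcond, if_pos hcond, List.idxOf_cons_ne _ hlx]; push_cast; ring
      · rw [if_neg hcond, if_neg hcond]

-- folding the whole weight dict: B's score is the zip-sum of A's addends
lemma scoreB_weight (langs : List String) :
    ∀ (zs : List (String × Int)) (w0 : PySem.Dict String Int),
    solutionScoreB (zs.foldl (fun d lp => d.insert lp.1 (d.getD lp.1 0 + lp.2)) w0) langs 0 0 PySem.Set.empty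
      = solutionScoreB w0 langs 0 0 PySem.Set.empty
        + (zs.filterMap (fun lp =>
            if lp.1 ∈ langs then some (lp.2 * (5 - (langs.idxOf lp.1 : Int))) else none)).sum := by
  intro zs
  induction zs with
  | nil => intro w0; simp
  | cons lp rest ih =>
    intro w0
    simp only [List.foldl_cons, List.filterMap_cons]
    rw [ih, scoreB_insert]
    have hce : PySem.Set.contains PySem.Set.empty lp.1 = false := rfl
    by_cases hm : lp.1 ∈ langs
    · rw [if_pos (⟨hm, hce⟩ : lp.1 ∈ langs ∧ PySem.Set.contains PySem.Set.empty lp.1 = false),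
        if_pos hm, List.sum_cons]
      split_ifs with hw
      · push_cast; ring
      · have hw' : w0.contains lp.1 = false := by simpa using hw
        rw [PySem.Dict.getD_of_not_contains w0 0 hw']
        push_cast; ring
    · rw [if_neg (fun hh => hm hh.1), if_neg hm]
      ring

-- value-mapped copy of a parse dict (proof-only helper)
def dictMapVal (g : List String → Int) (d : PySem.Dict String (List String)) : PySem.Dict String Int :=
  PySem.Dict.mk (d.items.map (fun p => (p.1, g p.2)))

lemma dictMapVal_insert (g : List String → Int) (d : PySem.Dict String (List String))
    (k : String) (v : List String) :
    dictMapVal g (d.insert k v) = (dictMapVal g d).insert k (g v) := by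
  apply PySem.Dict.ext
  have hc : (dictMapVal g d).contains k = d.contains k := by
    simp [dictMapVal, PySem.Dict.contains, List.any_map, Function.comp_def]
  by_cases hk : d.contains k = true
  · rw [show (dictMapVal g (d.insert k v)).items
        = ((d.insert k v).items).map (fun p => (p.1, g p.2)) from rfl,
      PySem.Dict.items_insert_of_contains d v hk,
      PySem.Dict.items_insert_of_contains (dictMapVal g d) (g v) (by rw [hc]; exact hk)]
    rw [show (dictMapVal g d).items = d.items.map (fun p => (p.1, g p.2)) from rfl]
    simp only [List.map_map]
    apply List.map_congr_left
    intro p _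
    by_cases hpk : p.1 = k
    · simp [hpk]
    · simp [hpk]
  · have hk' : d.contains k = false := by simpa using hk
    rw [show (dictMapVal g (d.insert k v)).items
        = ((d.insert k v).items).map (fun p => (p.1, g p.2)) from rfl,
      PySem.Dict.items_insert_of_not_contains d v hk',
      PySem.Dict.items_insert_of_not_contains (dictMapVal g d) (g v) (by rw [hc, hk'])]
    simp [dictMapVal]

lemma scores_eq_mapVal (g : List String → Int) (table : List String) :
    ∀ (d : PySem.Dict String (List String)),
    table.foldl (fun d row =>
        d.insert ((PySem.List.pyGet? ((PySem.Str.split? row " ").getD []) 0).getD "")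
          (g (((PySem.Str.split? row " ").getD []).drop 1))) (dictMapVal g d)
      = dictMapVal g (table.foldl (fun d row =>
          d.insert ((PySem.List.pyGet? ((PySem.Str.split? row " ").getD []) 0).getD "")
            (((PySem.Str.split? row " ").getD []).drop 1)) d) := by
  induction table with
  | nil => intro d; rfl
  | cons t ts ih =>
    intro d
    simp only [List.foldl_cons, ← dictMapVal_insert]
    exact ih _

lemma scores_eq_mapVal' (g : List String → Int) (table : List String) :
    table.foldl (fun d row =>
        d.insert ((PySem.List.pyGet? ((PySem.Str.split? row " ").getD []) 0).getD "")
          (g (((PySem.Str.split? row " ").getD []).drop 1))) PySem.Dict.empty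
      = dictMapVal g (table.foldl (fun d row =>
          d.insert ((PySem.List.pyGet? ((PySem.Str.split? row " ").getD []) 0).getD "")
            (((PySem.Str.split? row " ").getD []).drop 1)) PySem.Dict.empty) := by
  have h0 : (PySem.Dict.empty : PySem.Dict String Int) = dictMapVal g PySem.Dict.empty := rfl
  rw [h0]
  exact scores_eq_mapVal g table PySem.Dict.empty

-- the step function of Python's min under key (-score, name), on unmapped items (proof-only helper)
def pvMinStep (g : String × List String → Int) (acc : Option (String × Int))
    (p : String × List String) : Option (String × Int) :=
  match acc with
  | none => some (p.1, g p)
  | some mm =>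
      if (decide ((-(g p) : Int) < -mm.2) || (!decide ((-mm.2 : Int) < -(g p)) && decide (p.1 < mm.1))) = true
      then some (p.1, g p) else some mm

lemma min2_fold_aux (g : String × List String → Int) :
    ∀ (l : List (String × List String)) (m : Int) (n : String),
    l.foldl (pvMinStep g) (some (n, m))
      = some ((l.foldl (fun mp p =>
            if mp.1 < g p then (g p, p.1)
            else if mp.1 = g p then (if p.1 < mp.2 then (g p, p.1) else mp)
            else mp) (m, n)).2,
          (l.foldl (fun mp p =>
            if mp.1 < g p then (g p, p.1)
            else if mp.1 = g p then (if p.1 < mp.2 then (g p, p.1) else mp)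
            else mp) (m, n)).1) := by
  intro l
  induction l with
  | nil => intro m n; rfl
  | cons p rest ih =>
    intro m n
    simp only [List.foldl_cons]
    rcases lt_trichotomy m (g p) with hlt | heq | hgt
    · rw [show pvMinStep g (some (n, m)) p = some (p.1, g p) from by
        have h1 : ((-(g p) : Int) < -m) := by omega
        simp [pvMinStep, h1]]
      rw [if_pos hlt]
      exact ih (g p) p.1
    · by_cases hs : p.1 < n
      · rw [show pvMinStep g (some (n, m)) p = some (p.1, g p) from by
          have h1 : ¬ ((-(g p) : Int) < -m) := by omega
          have h2 : ¬ ((-m : Int) < -(g p)) := by omega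
          simp [pvMinStep, h1, h2, hs]]
        rw [if_neg (by omega : ¬ m < g p), if_pos heq, if_pos hs]
        exact ih (g p) p.1
      · rw [show pvMinStep g (some (n, m)) p = some (n, m) from by
          have h1 : ¬ ((-(g p) : Int) < -m) := by omega
          have h2 : ¬ ((-m : Int) < -(g p)) := by omega
          simp [pvMinStep, h1, h2, hs]]
        rw [if_neg (by omega : ¬ m < g p), if_pos heq, if_neg hs]
        exact ih m n
    · rw [show pvMinStep g (some (n, m)) p = some (n, m) from by
        have h1 : ¬ ((-(g p) : Int) < -m) := by omega
        have h2 : ((-m : Int) < -(g p)) := by omega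
        simp [pvMinStep, h1, h2]]
      rw [if_neg (by omega : ¬ m < g p), if_neg (by omega : ¬ m = g p)]
      exact ih m n

-- Python's min over (('', -1) :: candidates) under key (-score, name) mirrors A's running-best rule
lemma min2_fold_eq (g : String × List String → Int) (l : List (String × List String))
    (m : Int) (n : String) :
    PySem.List.min2? ((n, m) :: l.map (fun p => (p.1, g p))) (fun p => -p.2) (fun p => p.1)
      = some ((l.foldl (fun mp p =>
            if mp.1 < g p then (g p, p.1)
            else if mp.1 = g p then (if p.1 < mp.2 then (g p, p.1) else mp)
            else mp) (m, n)).2,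
          (l.foldl (fun mp p =>
            if mp.1 < g p then (g p, p.1)
            else if mp.1 = g p then (if p.1 < mp.2 then (g p, p.1) else mp)
            else mp) (m, n)).1) := by
  have hb : PySem.List.min2? ((n, m) :: l.map (fun p => (p.1, g p))) (fun p => -p.2) (fun p => p.1)
      = l.foldl (pvMinStep g) (some (n, m)) := by
    unfold PySem.List.min2?
    simp only [List.foldl_cons, List.foldl_map]
    apply PySem.List.foldl_congr_mem
    intro acc p _
    cases acc with
    | none => rfl
    | some mm => rfl
  rw [hb, min2_fold_aux]

-- ===== VERDICT (by name: the statement is the Claim_ definition above) =====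
theorem solution_spec : Claim_equal_solution := by
  intro table languages preference _ hpre
  have hpre' : ∀ t ∈ table, ∀ l ∈ languages.drop preference.length,
      ¬ l ∈ ((PySem.Str.split? t " ").getD []).drop 1 := by
    intro t ht l hl
    have h1 := List.all_eq_true.mp hpre l hl
    have h2 := List.all_eq_true.mp h1 t ht
    simpa using h2
  unfold Spec_solution solution solution_alt
  have hsl : ∀ xs : List String, PySem.List.slice xs (some 1) none = xs.drop 1 := by
    intro xs
    simpa using PySem.List.slice_from (xs := xs) (a := (1 : Int)) (by norm_num)
  simp only [hsl]
  set td : PySem.Dict String (List String) := table.foldl (fun d t =>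
      d.insert ((PySem.List.pyGet? ((PySem.Str.split? t " ").getD []) 0).getD "")
        (((PySem.Str.split? t " ").getD []).drop 1)) PySem.Dict.empty with htd
  have hnodup : td.keys.Nodup := by
    rw [htd]
    exact PySem.Dict.nodup_keys_foldl_insert_key table
      (fun t => (PySem.List.pyGet? ((PySem.Str.split? t " ").getD []) 0).getD "")
      (fun _ t => ((PySem.Str.split? t " ").getD []).drop 1) PySem.Dict.empty (by simp)
  -- per-row equality of the two scores, for rows coming from td
  have hscore : ∀ p ∈ td.items,
      solutionScoreB (solutionWeight languages preference) p.2 0 0 PySem.Set.empty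
        = solutionScoreA preference p.2 languages 0 0 := by
    intro p hp
    have hrow : ∃ t ∈ table, p.2 = ((PySem.Str.split? t " ").getD []).drop 1 := by
      rcases dict_values_from_table table PySem.Dict.empty p (htd ▸ hp) with h | h
      · simp [PySem.Dict.empty] at h
      · exact h
    have hnm : ∀ l ∈ languages.drop preference.length, ¬ l ∈ p.2 := by
      rcases hrow with ⟨t, ht, he⟩
      intro l hl; rw [he]; exact hpre' t ht l hl
    rw [scoreA_eq_sum p.2 preference languages 0 0 (by simpa using hnm)]
    unfold solutionWeight
    rw [scoreB_weight p.2 (languages.zip preference) PySem.Dict.empty, scoreB_empty]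
    simp only [List.drop_zero, zero_add]
    congr 1
    apply List.filterMap_congr
    intro lp _
    by_cases hm : lp.1 ∈ p.2
    · rw [if_pos hm, if_pos hm, index?_getD_eq_idxOf p.2 lp.1 hm]
    · rw [if_neg hm, if_neg hm]
  -- B's scores dict is the value-mapped parse dict
  have hscores : (table.foldl (fun d row =>
      d.insert ((PySem.List.pyGet? ((PySem.Str.split? row " ").getD []) 0).getD "")
        (solutionScoreB (solutionWeight languages preference) (((PySem.Str.split? row " ").getD []).drop 1) 0 0 PySem.Set.empty))
      PySem.Dict.empty)
      = dictMapVal (fun v => solutionScoreB (solutionWeight languages preference) v 0 0 PySem.Set.empty) td := by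
    rw [htd]
    exact scores_eq_mapVal'
      (fun v => solutionScoreB (solutionWeight languages preference) v 0 0 PySem.Set.empty) table
  rw [hscores]
  have hitems : (dictMapVal (fun v => solutionScoreB (solutionWeight languages preference) v 0 0 PySem.Set.empty) td).items
      = td.items.map (fun p => (p.1, solutionScoreB (solutionWeight languages preference) p.2 0 0 PySem.Set.empty)) := rfl
  rw [hitems]
  have hmapc : td.items.map (fun p => (p.1, solutionScoreB (solutionWeight languages preference) p.2 0 0 PySem.Set.empty))
      = td.items.map (fun p => (p.1, solutionScoreA preference p.2 languages 0 0)) := by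
    apply List.map_congr_left
    intro p hp
    rw [hscore p hp]
  rw [hmapc]
  have hm2 := min2_fold_eq (fun p => solutionScoreA preference p.2 languages 0 0) td.items (-1) ""
  simp only [] at hm2
  rw [hm2]
  -- A's side: fold over keys with getD = fold over items
  have hkeys : td.keys = td.items.map Prod.fst := rfl
  rw [hkeys, List.foldl_map]
  have hcongr :
      td.items.foldl (fun (mp : Int × String) (p : String × List String) =>
        if mp.1 < solutionScoreA preference (td.getD p.1 []) languages 0 0 then
          (solutionScoreA preference (td.getD p.1 []) languages 0 0, p.1)
        else if mp.1 = solutionScoreA preference (td.getD p.1 []) languages 0 0 then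
          (if p.1 < mp.2 then (solutionScoreA preference (td.getD p.1 []) languages 0 0, p.1) else mp)
        else mp) ((-1 : Int), "")
      = td.items.foldl (fun (mp : Int × String) (p : String × List String) =>
          if mp.1 < solutionScoreA preference p.2 languages 0 0 then (solutionScoreA preference p.2 languages 0 0, p.1)
          else if mp.1 = solutionScoreA preference p.2 languages 0 0 then
            (if p.1 < mp.2 then (solutionScoreA preference p.2 languages 0 0, p.1) else mp)
          else mp) ((-1 : Int), "") := by
    apply PySem.List.foldl_congr_mem
    intro acc p hp
    have hv : td.getD p.1 [] = p.2 :=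
      PySem.Dict.getD_of_mem_items td (by simpa using hp) hnodup []
    rw [hv]
  rw [hcongr]
  rfl
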